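-- pv_equiv track=rewrite | github.com/Utakarsh-Jain/MCDS-Redaction-Pipeline | web/app.py | build_pseudonym_map
-- ===== SOURCE A (Python) =====
-- from collections import OrderedDict
--
-- def build_pseudonym_map(entities):
--     counters = {}
--     mapping = OrderedDict()
--     for ent in entities:
--         etype = ent["type"]
--         raw = ent["text"].strip()
--         if not raw:
--             continue
--         key = f"{etype}::{raw.lower()}"
--         if key not in mapping:
--             counters[etype] = counters.get(etype, 0) + 1
--             mapping[key] = f"{etype}_{counters[etype]}"
--     return mapping
-- ===== SOURCE B (Python) =====
-- from collections import OrderedDict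
--
-- def build_pseudonym_map(entities):
--     # Pass 0: project every usable entity to its (typed key, type) pair.
--     typed_keys = [(f'{ent["type"]}::{ent["text"].strip().lower()}', ent["type"])
--                   for ent in entities if ent["text"].strip()]
--     # Pass 1: ordered dedup of the pairs by key (hash set for membership).
--     seen = set()
--     order = []
--     for pair in typed_keys:
--         if pair[0] not in seen:
--             seen.add(pair[0])
--             order.append(pair)
--     # Pass 2: number the unique keys per type.
--     counters = {}
--     mapping = OrderedDict()
--     for key, etype in order:
--         counters[etype] = counters.get(etype, 0) + 1
--         mapping[key] = f"{etype}_{counters[etype]}"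
--     return mapping
-- ===== Notes on version B (the rewrite author's own statement) =====
-- stated objective: alternative
-- what changed: Replaced A's single loop (per-entity key extraction interleaved with a membership test on the growing result dict and counter updates) by three passes: a comprehension projecting entities to (typed key, type) pairs, an ordered hash-set dedup of those pairs, and an unconditional numbering pass.
import Mathlib
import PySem

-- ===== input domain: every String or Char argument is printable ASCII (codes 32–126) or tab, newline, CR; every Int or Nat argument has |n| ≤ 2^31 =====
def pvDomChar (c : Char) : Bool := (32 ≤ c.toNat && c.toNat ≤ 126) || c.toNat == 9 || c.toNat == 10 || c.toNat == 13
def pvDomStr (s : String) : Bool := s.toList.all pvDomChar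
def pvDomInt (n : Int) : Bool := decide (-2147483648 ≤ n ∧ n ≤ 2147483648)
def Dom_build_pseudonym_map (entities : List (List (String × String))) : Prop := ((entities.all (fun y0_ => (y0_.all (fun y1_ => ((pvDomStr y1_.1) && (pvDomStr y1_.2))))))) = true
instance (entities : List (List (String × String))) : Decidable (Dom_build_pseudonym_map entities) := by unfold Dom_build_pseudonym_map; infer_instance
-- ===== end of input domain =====

-- B replaces A's single loop (per-entity key extraction interleaved with a membership test on the
-- growing result dict and counter updates) by three passes: a comprehension projecting entities to
-- (typed key, type) pairs, an ordered set-based dedup of those pairs, and an unconditional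
-- numbering pass. Alternative decomposition, same cost class.

-- ===== PORT A =====
-- one loop step of A: state = (counters, mapping)
def pvStepA (st : PySem.Dict String Int × PySem.Dict String String)
    (ent : List (String × String)) : PySem.Dict String Int × PySem.Dict String String :=
  let etype := ((PySem.Dict.mk ent).get? "type").getD ""      -- total form; Pre_ excludes KeyError
  let raw := PySem.Str.strip (((PySem.Dict.mk ent).get? "text").getD "")
  if raw = "" then st
  else
    let key := PySem.Str.join "" [etype, "::", PySem.Str.lower raw]
    if st.2.contains key then st
    else
      let n := st.1.getD etype 0 + 1
      (st.1.insert etype n, st.2.insert key (PySem.Str.join "" [etype, "_", PySem.Int.toStr n]))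

def build_pseudonym_map (entities : List (List (String × String))) : List (String × String) :=
  (entities.foldl pvStepA (PySem.Dict.empty, PySem.Dict.empty)).2.items

-- ===== PORT B =====
-- pass 0: the comprehension (filter + projection)
def pvTypedKeys (entities : List (List (String × String))) : List (String × String) :=
  (entities.filter (fun ent =>
    !(PySem.Str.strip (((PySem.Dict.mk ent).get? "text").getD "") == ""))).map
    (fun ent =>
      (PySem.Str.join "" [((PySem.Dict.mk ent).get? "type").getD "", "::",
         PySem.Str.lower (PySem.Str.strip (((PySem.Dict.mk ent).get? "text").getD ""))],
       ((PySem.Dict.mk ent).get? "type").getD ""))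

-- pass 1 step: ordered dedup of pairs by key; state = (seen, order)
def pvStepD (st : PySem.Set String × List (String × String))
    (pair : String × String) : PySem.Set String × List (String × String) :=
  if st.1.contains pair.1 then st else (st.1.add pair.1, st.2 ++ [pair])

-- pass 2 step: numbering; state = (counters, mapping), p = (key, etype)
def pvStep2 (st : PySem.Dict String Int × PySem.Dict String String)
    (p : String × String) : PySem.Dict String Int × PySem.Dict String String :=
  let n := st.1.getD p.2 0 + 1
  (st.1.insert p.2 n, st.2.insert p.1 (PySem.Str.join "" [p.2, "_", PySem.Int.toStr n]))

def build_pseudonym_map_alt (entities : List (List (String × String))) : List (String × String) :=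
  let order := ((pvTypedKeys entities).foldl pvStepD (PySem.Set.empty, [])).2
  (order.foldl pvStep2 (PySem.Dict.empty, PySem.Dict.empty)).2.items

-- ===== PRECONDITION & SPEC =====
-- Pre_ excludes exactly the entities lacking a "type" or "text" key, where A raises KeyError.
def Pre_build_pseudonym_map (entities : List (List (String × String))) : Prop :=
  (entities.all (fun ent =>
    (PySem.Dict.mk ent).contains "type" && (PySem.Dict.mk ent).contains "text")) = true
instance (entities : List (List (String × String))) : Decidable (Pre_build_pseudonym_map entities) := by
  unfold Pre_build_pseudonym_map; infer_instance

def pvWitness_build_pseudonym_map : (List (List (String × String))) :=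
  [[("type", "PER"), ("text", " Alice ")], [("type", "LOC"), ("text", "Paris")]]

def Spec_build_pseudonym_map (entities : List (List (String × String))) (out : List (String × String)) : Prop := out = build_pseudonym_map_alt entities
instance (entities : List (List (String × String))) (out : List (String × String)) : Decidable (Spec_build_pseudonym_map entities out) := by unfold Spec_build_pseudonym_map; infer_instance

-- ===== CLAIM (what is proved, stated in full; the proofs are below) =====
def Claim_equal_build_pseudonym_map : Prop := ∀ (entities : List (List (String × String))), Dom_build_pseudonym_map entities → Pre_build_pseudonym_map entities → Spec_build_pseudonym_map entities (build_pseudonym_map entities)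

-- ===== LEMMAS AND PROOFS =====

-- the values A's step computes from an entity
def pvEty (e : List (String × String)) : String := ((PySem.Dict.mk e).get? "type").getD ""
def pvRaw (e : List (String × String)) : String := PySem.Str.strip (((PySem.Dict.mk e).get? "text").getD "")
def pvKey (e : List (String × String)) : String := PySem.Str.join "" [pvEty e, "::", PySem.Str.lower (pvRaw e)]

-- A's step, lifted to the (key, etype) pair level (proof device only)
def pvStepA' (st : PySem.Dict String Int × PySem.Dict String String)
    (p : String × String) : PySem.Dict String Int × PySem.Dict String String :=
  if st.2.contains p.1 then st
  else (st.1.insert p.2 (st.1.getD p.2 0 + 1),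
        st.2.insert p.1 (PySem.Str.join "" [p.2, "_", PySem.Int.toStr (st.1.getD p.2 0 + 1)]))

theorem pvStepA_eq (st : PySem.Dict String Int × PySem.Dict String String) (e : List (String × String)) :
    pvStepA st e = if pvRaw e = "" then st else pvStepA' st (pvKey e, pvEty e) := rfl

theorem pvTypedKeys_cons (e : List (String × String)) (es : List (List (String × String))) :
    pvTypedKeys (e :: es)
      = if pvRaw e = "" then pvTypedKeys es else (pvKey e, pvEty e) :: pvTypedKeys es := by
  by_cases h0 : pvRaw e = ""
  · have h0' : PySem.Str.strip (((PySem.Dict.mk e).get? "text").getD "") = "" := h0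
    simp [pvTypedKeys, h0, h0']
  · have h0' : ¬ (PySem.Str.strip (((PySem.Dict.mk e).get? "text").getD "") = "") := h0
    simp [pvTypedKeys, h0', pvKey, pvEty, pvRaw]

-- A's fold over the entities equals its pair-level fold over the projected list
theorem pv_A_keyed (es : List (List (String × String)))
    (st : PySem.Dict String Int × PySem.Dict String String) :
    es.foldl pvStepA st = (pvTypedKeys es).foldl pvStepA' st := by
  induction es generalizing st with
  | nil => rfl
  | cons e es ih =>
    rw [List.foldl_cons, pvTypedKeys_cons, pvStepA_eq]
    by_cases h0 : pvRaw e = ""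
    · rw [if_pos h0, if_pos h0]
      exact ih st
    · rw [if_neg h0, if_neg h0, List.foldl_cons]
      exact ih _

theorem pv_set_contains_add (s : PySem.Set String) (x k : String) :
    (PySem.Set.add s x).contains k = (s.contains k || k == x) := by
  simp only [PySem.Set.add, PySem.Set.contains, List.contains_eq_mem]
  split
  · rename_i h
    simp only [decide_eq_true_eq] at h
    by_cases hk : k = x <;> simp [hk, h]
  · simp [List.mem_append, beq_eq_decide]

-- the dedup pass appends to its accumulator
theorem pv_dedup_acc (ps : List (String × String)) (s : PySem.Set String)
    (acc : List (String × String)) :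
    ps.foldl pvStepD (s, acc)
      = ((ps.foldl pvStepD (s, [])).1, acc ++ (ps.foldl pvStepD (s, [])).2) := by
  induction ps generalizing s acc with
  | nil => simp
  | cons p ps ih =>
    simp only [List.foldl_cons, pvStepD]
    by_cases h1 : s.contains p.1 = true
    · simp only [if_pos h1]
      exact ih s acc
    · simp only [if_neg h1, List.nil_append]
      rw [ih _ (acc ++ _), ih _ [p]]
      simp

-- main invariant: the pair-level A fold equals pass 2 over the dedup pass's output,
-- whenever the seen set mirrors the mapping's keys
theorem pv_main (ps : List (String × String))
    (c : PySem.Dict String Int) (m : PySem.Dict String String) (s : PySem.Set String)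
    (hsm : ∀ k, s.contains k = m.contains k) :
    ((ps.foldl pvStepD (s, [])).2).foldl pvStep2 (c, m) = ps.foldl pvStepA' (c, m) := by
  induction ps generalizing c m s with
  | nil => simp
  | cons p ps ih =>
    simp only [List.foldl_cons, pvStepD, pvStepA']
    by_cases h1 : s.contains p.1 = true
    · rw [if_pos h1, if_pos ((hsm p.1) ▸ h1)]
      exact ih c m s hsm
    · rw [if_neg h1, if_neg (by rw [← hsm p.1]; exact h1), List.nil_append]
      rw [pv_dedup_acc ps (s.add p.1) [p], List.foldl_append]
      have hstep : ([p]).foldl pvStep2 (c, m)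
          = (c.insert p.2 (c.getD p.2 0 + 1),
             m.insert p.1 (PySem.Str.join "" [p.2, "_", PySem.Int.toStr (c.getD p.2 0 + 1)])) := rfl
      rw [hstep]
      apply ih
      intro k
      rw [pv_set_contains_add, hsm k, PySem.Dict.contains_insert, Bool.or_comm]

-- ===== VERDICT (by name: the statement is the Claim_ definition above) =====
theorem build_pseudonym_map_spec : Claim_equal_build_pseudonym_map := by
  intro entities _ _
  show build_pseudonym_map entities = build_pseudonym_map_alt entities
  have h : (entities.foldl pvStepA (PySem.Dict.empty, PySem.Dict.empty))
      = (((pvTypedKeys entities).foldl pvStepD (PySem.Set.empty, [])).2).foldl pvStep2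
          (PySem.Dict.empty, PySem.Dict.empty) := by
    rw [pv_A_keyed, pv_main (pvTypedKeys entities) PySem.Dict.empty PySem.Dict.empty
      PySem.Set.empty (fun k => rfl)]
  exact congrArg (fun p => p.2.items) h
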